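-- pv_equiv track=rewrite | github.com/xonq/mycotools | mycotools/mycotools/utils/extractHmmsearch.py | synthesizeHits
-- ===== SOURCE A (Python) =====
-- def synthesizeHits( out_dict ):
--
--     check = []
--     for hit in out_dict:
--         names = set( x.split('\t')[0] for x in out_dict[ hit ][0].split('\n') )
--         check.append( names )
--
--     passing = set()
--     for names in check:
--         for name in list(names):
--             if all( name in x for x in check ):
--                 passing.add( name )
--
--     new_dict = {}
--     for hit in out_dict:
--         hit_str, aln_str = '', ''
--         for seq in out_dict[ hit ][ 0 ].split('\n'):
--             if seq.split('\t')[0] in passing: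
--                 hit_str += seq + '\n'
--         for seq in out_dict[ hit ][ 1 ].split( '\n' ):
--             if seq.split('\t')[0] in passing:
--                 aln_str += seq + '\n'
--         new_dict[ hit ] = ( hit_str, aln_str )
--
--     return new_dict
-- ===== SOURCE B (Python) =====
-- def synthesizeHits(out_dict):
--     # Count, per name, how many hit groups contain it (each group contributes at most
--     # once via the per-group set); a name passes iff its count equals the number of
--     # groups -- no passing set is ever materialised.
--     counts = {}
--     n_groups = 0
--     for v in out_dict.values():
--         n_groups += 1
--         for name in {line.split('\t')[0] for line in v[0].split('\n')}:
--             counts[name] = counts.get(name, 0) + 1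
--
--     new_dict = {}
--     for hit, v in out_dict.items():
--         new_dict[hit] = tuple(
--             ''.join(line + '\n' for line in s.split('\n')
--                     if counts.get(line.split('\t')[0], 0) == n_groups)
--             for s in (v[0], v[1]))
--     return new_dict
-- ===== Notes on version B (the rewrite author's own statement) =====
-- stated objective: alternative
-- what changed: B never builds A's passing set: it counts, in one dict, in how many hit groups each name occurs and keeps a line iff its name's count equals the number of groups, instead of A's per-name 'present in every group' scan over all groups for every name of every group.
import Mathlib
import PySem

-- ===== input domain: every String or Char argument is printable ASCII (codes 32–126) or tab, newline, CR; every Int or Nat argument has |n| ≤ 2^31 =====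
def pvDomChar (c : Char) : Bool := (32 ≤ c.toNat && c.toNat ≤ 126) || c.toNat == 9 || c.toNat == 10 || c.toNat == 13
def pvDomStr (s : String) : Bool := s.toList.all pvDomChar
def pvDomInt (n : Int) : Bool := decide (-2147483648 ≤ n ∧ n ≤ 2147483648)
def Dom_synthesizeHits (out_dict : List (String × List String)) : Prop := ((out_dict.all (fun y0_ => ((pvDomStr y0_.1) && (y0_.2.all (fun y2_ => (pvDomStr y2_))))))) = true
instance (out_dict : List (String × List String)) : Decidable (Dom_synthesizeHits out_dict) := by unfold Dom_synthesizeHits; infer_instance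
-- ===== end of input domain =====

-- B replaces A's passing set (per-name "in every group" scan) by one counting dict: a line
-- is kept iff its name's group-count equals the number of groups; objective: alternative.


-- ===== PORT A =====
-- seq.split('\t')[0]  (split? is some: the separator is non-empty; [0] exists: split is never empty)
def pvFirstField (seq : String) : String :=
  PySem.List.pyGetD ((PySem.Str.split? seq "\t").getD []) 0 ""

-- set( x.split('\t')[0] for x in s.split('\n') )
def pvNames (s : String) : PySem.Set String :=
  PySem.Set.ofList (((PySem.Str.split? s "\n").getD []).map pvFirstField)

-- hit_str accumulation: for seq in s.split('\n'): if seq.split('\t')[0] in passing: hit_str += seq + '\n'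
def pvAccum (passing : PySem.Set String) (s : String) : String :=
  ((PySem.Str.split? s "\n").getD []).foldl
    (fun acc seq => if PySem.Set.contains passing (pvFirstField seq) then acc ++ seq ++ "\n" else acc) ""

def synthesizeHits (out_dict : List (String × List String)) : List (String × List String) :=
  -- check = [ set of first fields of out_dict[hit][0].split('\n') for each hit ]
  let check : List (PySem.Set String) :=
    out_dict.foldl (fun acc kv => acc ++ [pvNames (PySem.List.pyGetD kv.2 0 "")]) []
  -- passing: every name of every group that occurs in all groups
  let passing : PySem.Set String :=
    check.foldl (fun p names =>
      names.foldl (fun p nm =>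
        if check.all (fun x => PySem.Set.contains x nm) then PySem.Set.add p nm else p) p)
      PySem.Set.empty
  -- new_dict (keys are unique under Pre_, so dict insertion appends)
  out_dict.foldl (fun nd kv =>
    nd ++ [(kv.1, [pvAccum passing (PySem.List.pyGetD kv.2 0 ""),
                   pvAccum passing (PySem.List.pyGetD kv.2 1 "")])]) []

-- ===== PORT B =====
-- one step of B's first loop: n_groups += 1; for name in {…}: counts[name] = counts.get(name,0)+1
def pvCountStep (st : PySem.Dict String Int × Int) (v : List String) :
    PySem.Dict String Int × Int :=
  ((pvNames (PySem.List.pyGetD v 0 "")).foldl (fun d nm => d.modify nm 0 (· + 1)) st.1,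
   st.2 + 1)

-- ''.join(line + '\n' for line in s.split('\n') if counts.get(line.split('\t')[0], 0) == n_groups)
def pvKeepC (counts : PySem.Dict String Int) (n : Int) (s : String) : String :=
  (((PySem.Str.split? s "\n").getD []).filter
      (fun line => counts.getD (pvFirstField line) 0 == n)).foldl
    (fun acc line => acc ++ line ++ "\n") ""

def synthesizeHits_alt (out_dict : List (String × List String)) : List (String × List String) :=
  let st : PySem.Dict String Int × Int :=
    out_dict.foldl (fun st kv => pvCountStep st kv.2) (PySem.Dict.empty, 0)
  out_dict.map (fun kv =>
    (kv.1, [pvKeepC st.1 st.2 (PySem.List.pyGetD kv.2 0 ""),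
            pvKeepC st.1 st.2 (PySem.List.pyGetD kv.2 1 "")]))

-- ===== PRECONDITION & SPEC =====
-- Pre_ excludes (a) values with fewer than 2 strings, on which A raises IndexError at out_dict[hit][1]
-- (or [0]), and (b) association lists with duplicate keys, which do not represent a Python dict
-- (Python collapses them before A ever runs, so neither port's list input reaches A as written).
def Pre_synthesizeHits (out_dict : List (String × List String)) : Prop :=
  (∀ kv ∈ out_dict, 2 ≤ kv.2.length) ∧ (out_dict.map Prod.fst).Nodup
instance (out_dict : List (String × List String)) : Decidable (Pre_synthesizeHits out_dict) := by
  unfold Pre_synthesizeHits; infer_instance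

def pvWitness_synthesizeHits : (List (String × List String)) :=
  [("h1", ["a\t1\nb\t2", "a\tx"]), ("h2", ["a\t3", "a\ty\nc\tz"])]

def Spec_synthesizeHits (out_dict : List (String × List String)) (out : List (String × List String)) : Prop := out = synthesizeHits_alt out_dict
instance (out_dict : List (String × List String)) (out : List (String × List String)) : Decidable (Spec_synthesizeHits out_dict out) := by unfold Spec_synthesizeHits; infer_instance

-- ===== CLAIM (what is proved, stated in full; the proofs are below) =====
def Claim_equal_synthesizeHits : Prop := ∀ (out_dict : List (String × List String)), Dom_synthesizeHits out_dict → Pre_synthesizeHits out_dict → Spec_synthesizeHits out_dict (synthesizeHits out_dict)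

-- ===== LEMMAS AND PROOFS =====

-- generic: filtering before the fold = skipping inside the fold
theorem pv_foldl_filter {α β : Type} (p : α → Bool) (f : β → α → β) (l : List α) (init : β) :
    (l.filter p).foldl f init = l.foldl (fun acc x => if p x then f acc x else acc) init := by
  induction l generalizing init with
  | nil => rfl
  | cons x t ih =>
    by_cases h : p x <;> simp [h, ih]

-- membership in A's `passing` accumulator (inner loop over one group's names)
theorem pv_mem_inner (check : List (PySem.Set String)) (names : List String)
    (p : PySem.Set String) (nm : String) :
    nm ∈ names.foldl (fun p nm =>
        if check.all (fun x => PySem.Set.contains x nm) then PySem.Set.add p nm else p) p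
      ↔ nm ∈ p ∨ (nm ∈ names ∧ check.all (fun x => PySem.Set.contains x nm) = true) := by
  induction names generalizing p with
  | nil => simp
  | cons y t ih =>
    rw [List.foldl_cons]
    by_cases h : check.all (fun x => PySem.Set.contains x y) = true
    · rw [if_pos h, ih]
      constructor
      · rintro (hm | hm)
        · rw [PySem.Set.mem_add] at hm
          rcases hm with hm | rfl
          · exact Or.inl hm
          · exact Or.inr ⟨List.mem_cons_self, h⟩
        · exact Or.inr ⟨List.mem_cons_of_mem _ hm.1, hm.2⟩
      · rintro (hm | ⟨hmem, hall⟩)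
        · exact Or.inl ((PySem.Set.mem_add p y nm).mpr (Or.inl hm))
        · rcases List.mem_cons.mp hmem with rfl | hmem
          · exact Or.inl ((PySem.Set.mem_add p nm nm).mpr (Or.inr rfl))
          · exact Or.inr ⟨hmem, hall⟩
    · rw [if_neg h, ih]
      constructor
      · rintro (hm | hm)
        · exact Or.inl hm
        · exact Or.inr ⟨List.mem_cons_of_mem _ hm.1, hm.2⟩
      · rintro (hm | ⟨hmem, hall⟩)
        · exact Or.inl hm
        · rcases List.mem_cons.mp hmem with rfl | hmem
          · exact absurd hall h
          · exact Or.inr ⟨hmem, hall⟩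

-- membership in A's `passing` accumulator (outer loop; `l` is the part still to scan)
theorem pv_mem_passingA (check l : List (PySem.Set String)) (p : PySem.Set String) (nm : String) :
    nm ∈ l.foldl (fun p names =>
        names.foldl (fun p nm =>
          if check.all (fun x => PySem.Set.contains x nm) then PySem.Set.add p nm else p) p) p
      ↔ nm ∈ p ∨ (∃ s ∈ l, nm ∈ s ∧ check.all (fun x => PySem.Set.contains x nm) = true) := by
  induction l generalizing p with
  | nil => simp
  | cons s rest ih =>
    rw [List.foldl_cons, ih, pv_mem_inner]
    constructor
    · rintro ((hm | hm) | ⟨u, hu, hm⟩)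
      · exact Or.inl hm
      · exact Or.inr ⟨s, List.mem_cons_self, hm⟩
      · exact Or.inr ⟨u, List.mem_cons_of_mem _ hu, hm⟩
    · rintro (hm | ⟨u, hu, hm⟩)
      · exact Or.inl (Or.inl hm)
      · rcases List.mem_cons.mp hu with rfl | hu
        · exact Or.inl (Or.inr hm)
        · exact Or.inr ⟨u, hu, hm⟩

-- B's counting state after folding over `l`: n_groups counts the groups, and each name's
-- count is the number of groups whose name set contains it
theorem pv_count_state (l : List (String × List String)) (d : PySem.Dict String Int) (n : Int) :
    (l.foldl (fun st kv => pvCountStep st kv.2) (d, n)).2 = n + l.length ∧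
    ∀ nm, (l.foldl (fun st kv => pvCountStep st kv.2) (d, n)).1.getD nm 0
        = d.getD nm 0 + ((l.map (fun kv => pvNames (PySem.List.pyGetD kv.2 0 ""))).countP
            (fun s => decide (nm ∈ s)) : Int) := by
  induction l generalizing d n with
  | nil => simp
  | cons kv t ih =>
    rw [List.foldl_cons]
    have hstep : pvCountStep (d, n) kv.2
        = ((pvNames (PySem.List.pyGetD kv.2 0 "")).foldl (fun d nm => d.modify nm 0 (· + 1)) d,
           n + 1) := rfl
    rw [hstep]
    obtain ⟨h2, h1⟩ := ih ((pvNames (PySem.List.pyGetD kv.2 0 "")).foldl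
        (fun d nm => d.modify nm 0 (· + 1)) d) (n + 1)
    refine ⟨by rw [h2]; simp only [List.length_cons]; omega, fun nm => ?_⟩
    rw [h1 nm, PySem.Dict.getD_foldl_modify_add_one]
    have hnd : (pvNames (PySem.List.pyGetD kv.2 0 "")).Nodup := PySem.Set.nodup_ofList _
    have hcnt : ((pvNames (PySem.List.pyGetD kv.2 0 "")).count nm : Int)
        = if nm ∈ pvNames (PySem.List.pyGetD kv.2 0 "") then 1 else 0 := by
      by_cases hm : nm ∈ pvNames (PySem.List.pyGetD kv.2 0 "")
      · rw [if_pos hm, List.count_eq_one_of_mem hnd hm]; rfl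
      · rw [if_neg hm, List.count_eq_zero_of_not_mem hm]; rfl
    rw [List.map_cons, List.countP_cons, hcnt]
    by_cases hm : nm ∈ pvNames (PySem.List.pyGetD kv.2 0 "")
    · simp [hm]; omega
    · simp [hm]

-- on a nonempty group list, B's count test equals membership in A's passing set
theorem pv_test_eq (check : List (PySem.Set String)) (hne : check ≠ []) (nm : String) :
    ((check.countP (fun s => decide (nm ∈ s)) : Int) == (check.length : Int))
      = PySem.Set.contains
          (check.foldl (fun p names =>
            names.foldl (fun p nm =>
              if check.all (fun x => PySem.Set.contains x nm) then PySem.Set.add p nm else p) p)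
            PySem.Set.empty) nm := by
  have hall : (∀ s ∈ check, nm ∈ s) ↔
      check.all (fun x => PySem.Set.contains x nm) = true := by
    rw [List.all_eq_true]
    exact ⟨fun h x hx => (PySem.Set.contains_iff x nm).mpr (h x hx),
           fun h x hx => (PySem.Set.contains_iff x nm).mp (h x hx)⟩
  by_cases h : ∀ s ∈ check, nm ∈ s
  · obtain ⟨s0, hs0⟩ := List.exists_mem_of_ne_nil check hne
    have hc : check.countP (fun s => decide (nm ∈ s)) = check.length :=
      List.countP_eq_length.mpr (fun s hs => decide_eq_true (h s hs))
    have hmem : nm ∈ check.foldl (fun p names =>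
        names.foldl (fun p nm =>
          if check.all (fun x => PySem.Set.contains x nm) then PySem.Set.add p nm else p) p)
        PySem.Set.empty := by
      rw [pv_mem_passingA]
      exact Or.inr ⟨s0, hs0, h s0 hs0, hall.mp h⟩
    rw [hc, (PySem.Set.contains_iff _ nm).mpr hmem]
    simp
  · have hc : check.countP (fun s => decide (nm ∈ s)) < check.length := by
      rcases Nat.lt_or_ge (check.countP (fun s => decide (nm ∈ s))) check.length with hlt | hge
      · exact hlt
      · exact absurd (fun s hs => of_decide_eq_true
          (List.countP_eq_length.mp (Nat.le_antisymm List.countP_le_length hge) s hs)) h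
    have hmem : nm ∉ check.foldl (fun p names =>
        names.foldl (fun p nm =>
          if check.all (fun x => PySem.Set.contains x nm) then PySem.Set.add p nm else p) p)
        PySem.Set.empty := by
      rw [pv_mem_passingA]
      rintro (hm | ⟨u, hu, _, hallb⟩)
      · exact absurd hm List.not_mem_nil
      · exact h (hall.mpr hallb)
    have hcon : PySem.Set.contains (check.foldl (fun p names =>
        names.foldl (fun p nm =>
          if check.all (fun x => PySem.Set.contains x nm) then PySem.Set.add p nm else p) p)
        PySem.Set.empty) nm = false := by
      cases hx : PySem.Set.contains _ nm
      · rfl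
      · exact absurd ((PySem.Set.contains_iff _ nm).mp hx) hmem
    rw [hcon, beq_eq_false_iff_ne]
    intro hx
    omega
  
-- with agreeing tests, B's filter-then-join equals A's skip-inside-the-loop append
theorem pv_keepC_eq_accum (counts : PySem.Dict String Int) (n : Int) (Q : PySem.Set String)
    (h : ∀ x, (counts.getD x 0 == n) = PySem.Set.contains Q x) (s : String) :
    pvKeepC counts n s = pvAccum Q s := by
  unfold pvKeepC pvAccum
  rw [pv_foldl_filter]
  simp only [h]

-- ===== VERDICT (by name: the statement is the Claim_ definition above) =====
set_option maxHeartbeats 1000000 in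
theorem synthesizeHits_spec : Claim_equal_synthesizeHits := by
  intro out_dict _ _
  unfold Spec_synthesizeHits synthesizeHits synthesizeHits_alt
  simp only [PySem.List.foldl_append_singleton_eq_map, List.nil_append]
  apply List.map_congr_left
  intro kv hkv
  have hne : out_dict.map (fun kv => pvNames (PySem.List.pyGetD kv.2 0 "")) ≠ [] := by
    intro h
    rw [List.map_eq_nil_iff] at h
    subst h
    exact absurd hkv (List.not_mem_nil)
  obtain ⟨h2, h1⟩ := pv_count_state out_dict PySem.Dict.empty 0
  have htest : ∀ x,
      ((out_dict.foldl (fun st kv => pvCountStep st kv.2) (PySem.Dict.empty, 0)).1.getD x 0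
        == (out_dict.foldl (fun st kv => pvCountStep st kv.2) (PySem.Dict.empty, 0)).2)
      = PySem.Set.contains
          ((out_dict.map (fun kv => pvNames (PySem.List.pyGetD kv.2 0 ""))).foldl
            (fun p names =>
              names.foldl (fun p nm =>
                if (out_dict.map (fun kv => pvNames (PySem.List.pyGetD kv.2 0 ""))).all
                    (fun x => PySem.Set.contains x nm)
                then PySem.Set.add p nm else p) p)
            PySem.Set.empty) x := by
    intro x
    rw [h1 x, h2]
    have hd : (PySem.Dict.empty : PySem.Dict String Int).getD x 0 = 0 := rfl
    rw [hd, zero_add, zero_add]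
    have h3 := pv_test_eq _ hne x
    rw [List.length_map] at h3
    exact h3
  rw [pv_keepC_eq_accum _ _ _ htest, pv_keepC_eq_accum _ _ _ htest]
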